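-- pv_equiv track=rewrite | github.com/TLantern/Plumbing_AGI | ops_integrations/services/phone_service.py | is_strict_negative_response
-- ===== SOURCE A (Python) =====
-- def is_strict_negative_response(text: str) -> bool:
--     """Flexible no detection for appointment confirmation - accepts any response with negative intent"""
--     norm = " ".join((text or "").lower().strip().strip(".,!?").split())
--
--     # Check for any form of "no" anywhere in the text
--     if any(word in norm for word in ["no", "nope", "nah"]):
--         return True
--
--     # Check for negative words
--     negative_words = ["not", "can't", "cannot", "won't", "will not", "don't", "do not", "doesn't", "does not", "unable", "unavailable", "busy", "conflict"]
--     if any(word in norm for word in negative_words):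
--         return True
--
--     # Check for negative phrases
--     negative_phrases = ["that doesn't work", "that does not work", "not that time", "not today", "can't make it", "cannot make it", "not available", "busy then", "have other plans", "doesn't work", "does not work", "not good", "not right", "wrong time", "bad time"]
--     if any(phrase in norm for phrase in negative_phrases):
--         return True
--
--     # Vocal negations
--     if any(vocal in norm for vocal in ["uh uh", "nuh uh", "mm mm", "not really", "maybe not", "probably not"]):
--         return True
--
--     # Common negative expressions
--     if any(expr in norm for expr in ["i don't think so", "i don't agree", "that's not right", "that's wrong"]):
--         return True
--
--     return False
-- ===== SOURCE B (Python) =====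
-- _TERMS = (
--     "no", "nope", "nah",
--     "not", "can't", "cannot", "won't", "will not", "don't", "do not",
--     "doesn't", "does not", "unable", "unavailable", "busy", "conflict",
--     "that doesn't work", "that does not work", "not that time", "not today",
--     "can't make it", "cannot make it", "not available", "busy then",
--     "have other plans", "doesn't work", "does not work", "not good",
--     "not right", "wrong time", "bad time",
--     "uh uh", "nuh uh", "mm mm", "not really", "maybe not", "probably not",
--     "i don't think so", "i don't agree", "that's not right", "that's wrong",
-- )
--
--
-- def is_strict_negative_response(text: str) -> bool:
--     """Single left-to-right position scan: at each position of the normalized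
--     text, test whether any negative term starts there."""
--     norm = " ".join((text or "").lower().strip().strip(".,!?").split())
--     for i in range(len(norm) + 1):
--         for t in _TERMS:
--             if norm.startswith(t, i):
--                 return True
--     return False
-- ===== Notes on version B (the rewrite author's own statement) =====
-- stated objective: alternative
-- what changed: Replaced the five sequential term-major any(term in norm) membership passes by a single left-to-right position scan of the normalized text that tests at each position whether any negative term starts there (prefix check per position).
import Mathlib
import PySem

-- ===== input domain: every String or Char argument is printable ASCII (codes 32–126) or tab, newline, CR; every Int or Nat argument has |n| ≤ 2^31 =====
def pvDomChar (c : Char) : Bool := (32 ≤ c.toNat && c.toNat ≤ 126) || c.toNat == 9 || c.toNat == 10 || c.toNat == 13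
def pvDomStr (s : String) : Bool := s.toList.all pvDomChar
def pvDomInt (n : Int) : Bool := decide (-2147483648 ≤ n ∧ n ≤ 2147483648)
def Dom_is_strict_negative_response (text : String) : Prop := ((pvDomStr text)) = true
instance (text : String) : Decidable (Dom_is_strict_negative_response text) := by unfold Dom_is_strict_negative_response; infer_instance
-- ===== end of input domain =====

-- B replaces A's five term-major any(term in norm) passes by a single left-to-right
-- position scan of the normalized text with a per-position prefix test (objective: alternative).

-- shared normalization, identical in both Pythons:
-- " ".join((text or "").lower().strip().strip(".,!?").split())
def pvNorm (text : String) : String :=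
  PySem.Str.join " "
    (PySem.Str.split₀ (PySem.Str.stripChars (PySem.Str.strip (PySem.Str.lower text)) ".,!?"))

-- ===== PORT A =====
def is_strict_negative_response (text : String) : Bool :=
  let norm := pvNorm text
  if (["no", "nope", "nah"].any fun word => PySem.Str.isIn word norm) then true
  else
    let negative_words := ["not", "can't", "cannot", "won't", "will not", "don't", "do not",
      "doesn't", "does not", "unable", "unavailable", "busy", "conflict"]
    if (negative_words.any fun word => PySem.Str.isIn word norm) then true
    else
      let negative_phrases := ["that doesn't work", "that does not work", "not that time",
        "not today", "can't make it", "cannot make it", "not available", "busy then",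
        "have other plans", "doesn't work", "does not work", "not good", "not right",
        "wrong time", "bad time"]
      if (negative_phrases.any fun phrase => PySem.Str.isIn phrase norm) then true
      else if (["uh uh", "nuh uh", "mm mm", "not really", "maybe not", "probably not"].any
          fun vocal => PySem.Str.isIn vocal norm) then true
      else if (["i don't think so", "i don't agree", "that's not right", "that's wrong"].any
          fun expr => PySem.Str.isIn expr norm) then true
      else false

-- ===== PORT B =====
def pvTerms : List (List Char) :=
  ["no".toList, "nope".toList, "nah".toList,
   "not".toList, "can't".toList, "cannot".toList, "won't".toList, "will not".toList,
   "don't".toList, "do not".toList, "doesn't".toList, "does not".toList, "unable".toList,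
   "unavailable".toList, "busy".toList, "conflict".toList,
   "that doesn't work".toList, "that does not work".toList, "not that time".toList,
   "not today".toList, "can't make it".toList, "cannot make it".toList,
   "not available".toList, "busy then".toList, "have other plans".toList,
   "doesn't work".toList, "does not work".toList, "not good".toList, "not right".toList,
   "wrong time".toList, "bad time".toList,
   "uh uh".toList, "nuh uh".toList, "mm mm".toList, "not really".toList,
   "maybe not".toList, "probably not".toList,
   "i don't think so".toList, "i don't agree".toList, "that's not right".toList,
   "that's wrong".toList]

-- the position loop of B: at each suffix (= each start position i, including i = len),
-- test whether some term starts there (norm.startswith(t, i))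
def pvScan : List Char → Bool
  | [] => pvTerms.any fun t => t.isPrefixOf ([] : List Char)
  | c :: r => (pvTerms.any fun t => t.isPrefixOf (c :: r)) || pvScan r

def is_strict_negative_response_alt (text : String) : Bool :=
  pvScan (pvNorm text).toList

-- ===== PRECONDITION & SPEC =====
def Spec_is_strict_negative_response (text : String) (out : Bool) : Prop := out = is_strict_negative_response_alt text
instance (text : String) (out : Bool) : Decidable (Spec_is_strict_negative_response text out) := by unfold Spec_is_strict_negative_response; infer_instance

-- ===== CLAIM (what is proved, stated in full; the proofs are below) =====
def Claim_equal_is_strict_negative_response : Prop := ∀ (text : String), Dom_is_strict_negative_response text → Spec_is_strict_negative_response text (is_strict_negative_response text)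

-- ===== LEMMAS AND PROOFS =====

-- 'sub in s' on the empty string is exactly a prefix test there
theorem pvIsIn_nil (t : List Char) :
    PySem.Chars.isIn t [] = t.isPrefixOf ([] : List Char) := by
  rw [Bool.eq_iff_iff]
  simp [PySem.Chars.isIn_iff_infix, List.isPrefixOf_iff_prefix]

-- 'sub in s' unfolds one position: a prefix here, or a substring of the tail
theorem pvIsIn_cons (t : List Char) (c : Char) (r : List Char) :
    PySem.Chars.isIn t (c :: r) = (t.isPrefixOf (c :: r) || PySem.Chars.isIn t r) := by
  rw [Bool.eq_iff_iff]
  simp [PySem.Chars.isIn_iff_infix, List.infix_cons_iff, List.isPrefixOf_iff_prefix]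

theorem pvAny_or (l : List (List Char)) (p q : List Char → Bool) :
    (l.any fun x => p x || q x) = (l.any p || l.any q) := by
  induction l with
  | nil => simp
  | cons a l ih => simp [ih, Bool.or_assoc, Bool.or_left_comm]

-- the position scan computes term-major substring membership
theorem pvScan_eq (s : List Char) :
    pvScan s = pvTerms.any fun t => PySem.Chars.isIn t s := by
  induction s with
  | nil => simp only [pvScan, pvIsIn_nil]
  | cons c r ih =>
      simp only [pvScan, ih, pvIsIn_cons, pvAny_or]

theorem is_strict_negative_response_spec' (text : String) :
    is_strict_negative_response text = is_strict_negative_response_alt text := by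
  unfold is_strict_negative_response is_strict_negative_response_alt
  rw [pvScan_eq]
  generalize pvNorm text = norm
  simp only [pvTerms, List.any_cons, List.any_nil, PySem.Str.isIn_eq]
  simp [Bool.or_assoc]

-- ===== VERDICT (by name: the statement is the Claim_ definition above) =====
theorem is_strict_negative_response_spec : Claim_equal_is_strict_negative_response := by
  intro text _
  exact is_strict_negative_response_spec' text
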